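-- pv_equiv track=rewrite | github.com/mattlarkin8/automation | automation/automation.py | standardize_phones
-- ===== SOURCE A (Python) =====
-- def standardize_phones(phones):
--     nums = ["1","2","3","4","5","6","7","8","9","0"]
--     new_phones = []
--     standard_phones = []
--
--     for phone in phones:
--         new = ""
--         for char in phone:
--             if char in nums:
--                 new += char
--         new_phones.append(new)
--
--     for phone in new_phones:
--         if len(phone) == 7:
--             new_phone = "206" + phone
--             standard_phones.append(new_phone)
--         else:
--             standard_phones.append(phone)
--
--     return standard_phones
-- ===== SOURCE B (Python) =====
-- def _digits(s):
--     # divide-and-conquer digit extraction: halve the string, recurse, concatenate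
--     n = len(s)
--     if n == 0:
--         return ""
--     if n == 1:
--         return s if s in "0123456789" else ""
--     m = n // 2
--     return _digits(s[:m]) + _digits(s[m:])
--
--
-- def standardize_phones(phones):
--     # divide-and-conquer over the list: halve, recurse on both halves, concatenate
--     n = len(phones)
--     if n == 0:
--         return []
--     if n == 1:
--         s = _digits(phones[0])
--         return ["206" + s] if len(s) == 7 else [s]
--     m = n // 2
--     return standardize_phones(phones[:m]) + standardize_phones(phones[m:])
-- ===== Notes on version B (the rewrite author's own statement) =====
-- stated objective: alternative
-- what changed: B replaces A's two sequential accumulation loops with divide-and-conquer recursion: the phone list (and, inside, each string) is split in half, both halves are processed recursively and the results concatenated; the single-element base case does the digit test and the '206' prefixing.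
import Mathlib
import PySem

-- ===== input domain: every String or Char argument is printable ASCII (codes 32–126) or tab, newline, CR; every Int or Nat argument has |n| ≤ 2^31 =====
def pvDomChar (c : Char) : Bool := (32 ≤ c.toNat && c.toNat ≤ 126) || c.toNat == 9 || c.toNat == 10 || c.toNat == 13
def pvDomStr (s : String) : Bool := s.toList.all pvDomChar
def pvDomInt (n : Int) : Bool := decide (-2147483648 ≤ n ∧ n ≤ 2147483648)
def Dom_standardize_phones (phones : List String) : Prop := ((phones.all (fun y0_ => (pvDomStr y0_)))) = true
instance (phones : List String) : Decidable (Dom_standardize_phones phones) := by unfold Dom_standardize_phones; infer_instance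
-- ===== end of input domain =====

-- B replaces A's two sequential accumulation loops with divide-and-conquer recursion over the list and each string; same values, a different algorithm shape (alternative, not faster).


-- ===== PORT A =====
-- nums = ["1",...,"0"] (single-char strings; membership `char in nums` is a char test)
def pvNumsA : List Char := ['1','2','3','4','5','6','7','8','9','0']

-- first loop body: strip non-digits by accumulating `new` char by char
def pvStripA (phone : String) : String :=
  String.ofList (phone.toList.foldl (fun nw c => if c ∈ pvNumsA then nw ++ [c] else nw) [])

def standardize_phones (phones : List String) : List String :=
  let new_phones := phones.foldl (fun acc phone => acc ++ [pvStripA phone]) []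
  new_phones.foldl (fun acc phone =>
    if phone.toList.length = 7 then acc ++ [String.ofList ('2' :: '0' :: '6' :: phone.toList)]
    else acc ++ [phone]) []

-- ===== PORT B =====
def pvDigitsB : List Char := "0123456789".toList

-- _digits: halve the string, recurse on both halves, concatenate
def pvDigitsDC (cs : List Char) : List Char :=
  if _h0 : cs.length = 0 then []
  else if _h1 : cs.length = 1 then
    if cs.headI ∈ pvDigitsB then cs else []
  else
    pvDigitsDC (cs.take (cs.length / 2)) ++ pvDigitsDC (cs.drop (cs.length / 2))
termination_by cs.length
decreasing_by
  · simp; omega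
  · simp; omega

def standardize_phones_alt (phones : List String) : List String :=
  if _h0 : phones.length = 0 then []
  else if _h1 : phones.length = 1 then
    let s := pvDigitsDC phones.headI.toList
    if s.length = 7 then [String.ofList ('2' :: '0' :: '6' :: s)] else [String.ofList s]
  else
    standardize_phones_alt (phones.take (phones.length / 2)) ++
      standardize_phones_alt (phones.drop (phones.length / 2))
termination_by phones.length
decreasing_by
  · simp; omega
  · simp; omega

-- ===== PRECONDITION & SPEC =====
def Spec_standardize_phones (phones : List String) (out : List String) : Prop := out = standardize_phones_alt phones
instance (phones : List String) (out : List String) : Decidable (Spec_standardize_phones phones out) := by unfold Spec_standardize_phones; infer_instance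

-- ===== CLAIM (what is proved, stated in full; the proofs are below) =====
def Claim_equal_standardize_phones : Prop := ∀ (phones : List String), Dom_standardize_phones phones → Spec_standardize_phones phones (standardize_phones phones)

-- ===== LEMMAS AND PROOFS =====
-- the common per-phone value both sides compute
def pvG (p : String) : String :=
  let s := p.toList.filter (fun c => decide (c ∈ pvNumsA))
  if s.length = 7 then String.ofList ('2' :: '0' :: '6' :: s) else String.ofList s

theorem pv_foldl_snoc {α β : Type} (g : α → β) (l : List α) (acc : List β) :
    l.foldl (fun a x => a ++ [g x]) acc = acc ++ l.map g := by
  induction l generalizing acc with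
  | nil => simp
  | cons x xs ih => simp [List.foldl, ih]

theorem pv_foldl_filter {α : Type} (p : α → Bool) (l : List α) (acc : List α) :
    l.foldl (fun a x => if p x then a ++ [x] else a) acc = acc ++ l.filter p := by
  induction l generalizing acc with
  | nil => simp
  | cons x xs ih =>
    simp only [List.foldl, List.filter]
    cases h : p x <;> simp [ih]

theorem pv_mem_iff (c : Char) : (c ∈ pvDigitsB) ↔ (c ∈ pvNumsA) := by
  simp [pvNumsA, pvDigitsB]
  tauto

-- the divide-and-conquer digit extraction equals a filter
theorem pv_dc_singleton (c : Char) :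
    pvDigitsDC [c] = if c ∈ pvNumsA then [c] else [] := by
  rw [pvDigitsDC]
  simp [List.headI, pv_mem_iff]

theorem pv_digitsDC_eq (cs : List Char) :
    pvDigitsDC cs = cs.filter (fun c => decide (c ∈ pvNumsA)) := by
  induction cs using pvDigitsDC.induct with
  | case1 cs h0 =>
    rw [List.length_eq_zero_iff] at h0
    subst h0; simp [pvDigitsDC]
  | case2 cs h0 h1 h2 =>
    obtain ⟨c, rfl⟩ := List.length_eq_one_iff.mp h1
    rw [pv_dc_singleton]
    by_cases hc : c ∈ pvNumsA <;> simp [List.filter, hc]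
  | case3 cs h0 h1 h2 =>
    obtain ⟨c, rfl⟩ := List.length_eq_one_iff.mp h1
    rw [pv_dc_singleton]
    by_cases hc : c ∈ pvNumsA <;> simp [List.filter, hc]
  | case4 cs h0 h1 ih1 ih2 =>
    rw [pvDigitsDC]
    simp only [h0, h1, dite_false]
    rw [ih1, ih2, ← List.filter_append, List.take_append_drop]

-- the divide-and-conquer list recursion equals a map of pvG
theorem pv_alt_singleton (p : String) : standardize_phones_alt [p] = [pvG p] := by
  rw [standardize_phones_alt]
  simp only [List.length_cons, List.length_nil, List.headI]
  norm_num
  rw [pv_digitsDC_eq, pvG]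
  split <;> simp_all

theorem pv_alt_eq_map (phones : List String) :
    standardize_phones_alt phones = phones.map pvG := by
  induction phones using standardize_phones_alt.induct with
  | case1 phones h0 =>
    rw [List.length_eq_zero_iff] at h0
    subst h0; simp [standardize_phones_alt]
  | case2 phones h0 h1 h7 =>
    obtain ⟨p, rfl⟩ := List.length_eq_one_iff.mp h1
    simp [pv_alt_singleton]
  | case3 phones h0 h1 h7 =>
    obtain ⟨p, rfl⟩ := List.length_eq_one_iff.mp h1
    simp [pv_alt_singleton]
  | case4 phones h0 h1 ih1 ih2 =>
    rw [standardize_phones_alt]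
    simp only [h0, h1, dite_false]
    rw [ih1, ih2, ← List.map_append, List.take_append_drop]

theorem pv_stripA_eq (phone : String) :
    pvStripA phone = String.ofList (phone.toList.filter (fun c => decide (c ∈ pvNumsA))) := by
  unfold pvStripA
  congr 1
  have h : (fun (nw : List Char) c => if c ∈ pvNumsA then nw ++ [c] else nw)
       = (fun nw c => if (decide (c ∈ pvNumsA)) = true then nw ++ [c] else nw) := by
    funext nw c; simp
  rw [h, pv_foldl_filter (fun c => decide (c ∈ pvNumsA))]
  simp

theorem pv_a_eq_map (phones : List String) :
    standardize_phones phones = phones.map pvG := by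
  unfold standardize_phones
  have h2 : (fun (acc : List String) phone =>
      if phone.toList.length = 7 then acc ++ [String.ofList ('2' :: '0' :: '6' :: phone.toList)]
      else acc ++ [phone])
      = (fun acc phone => acc ++ [if phone.toList.length = 7
          then String.ofList ('2' :: '0' :: '6' :: phone.toList) else phone]) := by
    funext acc phone; split <;> rfl
  simp only [h2, pv_foldl_snoc, List.nil_append, List.map_map]
  apply List.map_congr_left
  intro p _
  simp only [Function.comp, pv_stripA_eq, pvG]
  simp

-- ===== VERDICT (by name: the statement is the Claim_ definition above) =====
theorem standardize_phones_spec : Claim_equal_standardize_phones := by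
  intro phones _
  unfold Spec_standardize_phones
  rw [pv_a_eq_map, pv_alt_eq_map]
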